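-- pv_equiv track=rewrite | github.com/dhanush-urs/repobrain | apps/api/app/analyzers/javascript_analyzer.py | detect_framework_signals
-- ===== SOURCE A (Python) =====
-- from typing import Dict, List, Any
--
-- def detect_framework_signals(content: str, imports: List[str]) -> List[str]:
--     """Detect JavaScript framework usage."""
--     signals = []
--     content_lower = content.lower()
--
--     # Frontend frameworks
--     if any(fw in ' '.join(imports).lower() for fw in ['react', 'react-dom']):
--         signals.append("react")
--     elif any(fw in ' '.join(imports).lower() for fw in ['vue', '@vue']):
--         signals.append("vue")
--     elif any(fw in ' '.join(imports).lower() for fw in ['@angular', 'angular']):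
--         signals.append("angular")
--     elif any(fw in ' '.join(imports).lower() for fw in ['svelte', 'sveltekit']):
--         signals.append("svelte")
--
--     # Backend frameworks
--     if any(fw in ' '.join(imports).lower() for fw in ['express', 'fastify', 'koa']):
--         signals.append("node_web_framework")
--     elif any(fw in ' '.join(imports).lower() for fw in ['@nestjs', 'nest']):
--         signals.append("nestjs")
--     elif any(fw in ' '.join(imports).lower() for fw in ['next', 'nuxt']):
--         signals.append("fullstack_framework")
--
--     # Testing frameworks
--     if any(fw in ' '.join(imports).lower() for fw in ['jest', 'mocha', 'chai', 'cypress']):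
--         signals.append("testing_framework")
--
--     # Build tools
--     if any(fw in ' '.join(imports).lower() for fw in ['webpack', 'vite', 'rollup', 'parcel']):
--         signals.append("build_tool")
--
--     return signals
-- ===== SOURCE B (Python) =====
-- # B: one pass over the imports builds a set of hit labels (no joined string at all);
-- # a second pass over the priority table keeps the first hit label of each group.
-- FRAMEWORKS = [
--     [("react", ("react", "react-dom")),
--      ("vue", ("vue", "@vue")),
--      ("angular", ("@angular", "angular")),
--      ("svelte", ("svelte", "sveltekit"))],
--     [("node_web_framework", ("express", "fastify", "koa")),
--      ("nestjs", ("@nestjs", "nest")),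
--      ("fullstack_framework", ("next", "nuxt"))],
--     [("testing_framework", ("jest", "mocha", "chai", "cypress"))],
--     [("build_tool", ("webpack", "vite", "rollup", "parcel"))],
-- ]
--
-- def detect_framework_signals(content, imports):
--     # Phase 1: scan each import once, recording every label whose keywords hit it.
--     # Correct because no keyword contains a space, so a keyword occurs in
--     # ' '.join(imports).lower() exactly when it occurs in some single import.
--     hit = set()
--     for imp in imports:
--         low = imp.lower()
--         for group in FRAMEWORKS:
--             for label, kws in group:
--                 if any(k in low for k in kws):
--                     hit.add(label)
--     # Phase 2: per group, emit the highest-priority label that was hit.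
--     signals = []
--     for group in FRAMEWORKS:
--         for label, _ in group:
--             if label in hit:
--                 signals.append(label)
--                 break
--     return signals
-- ===== Notes on version B (the rewrite author's own statement) =====
-- stated objective: alternative
-- what changed: B never builds the joined string A rescans in every condition: one pass over the import list marks each label whose keywords hit an individual import in a set (sound because no keyword contains a space, so a keyword occurs in ' '.join(imports).lower() iff it occurs in a single import), then a pass over the priority table emits the first marked label of each group.
import Mathlib
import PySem

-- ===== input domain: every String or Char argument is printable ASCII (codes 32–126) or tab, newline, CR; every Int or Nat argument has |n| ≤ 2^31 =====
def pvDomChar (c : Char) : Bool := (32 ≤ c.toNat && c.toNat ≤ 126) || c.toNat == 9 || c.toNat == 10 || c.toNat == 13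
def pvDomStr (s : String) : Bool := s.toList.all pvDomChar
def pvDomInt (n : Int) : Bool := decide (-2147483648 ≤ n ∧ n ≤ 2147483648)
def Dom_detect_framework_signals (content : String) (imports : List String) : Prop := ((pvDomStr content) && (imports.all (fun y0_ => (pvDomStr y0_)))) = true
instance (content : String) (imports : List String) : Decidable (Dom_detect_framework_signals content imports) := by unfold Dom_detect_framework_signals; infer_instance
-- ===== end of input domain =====

-- B never joins the imports: one pass over the import list builds the set of hit labels
-- (sound because no keyword contains a space), then a table pass emits the first hit
-- label of each priority group; same return value as A (alternative decomposition).

-- ===== PORT A =====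
-- literal transliteration: content.lower() is computed (and unused), and the joined-lowered
-- import string is recomputed inside every condition, exactly as in the Python.
def detect_framework_signals (content : String) (imports : List String) : List String :=
  let _content_lower := PySem.Str.lower content
  let signals : List String := []
  let signals :=
    if (["react", "react-dom"].any (fun fw => PySem.Str.isIn fw (PySem.Str.lower (PySem.Str.join " " imports)))) then
      signals ++ ["react"]
    else if (["vue", "@vue"].any (fun fw => PySem.Str.isIn fw (PySem.Str.lower (PySem.Str.join " " imports)))) then
      signals ++ ["vue"]
    else if (["@angular", "angular"].any (fun fw => PySem.Str.isIn fw (PySem.Str.lower (PySem.Str.join " " imports)))) then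
      signals ++ ["angular"]
    else if (["svelte", "sveltekit"].any (fun fw => PySem.Str.isIn fw (PySem.Str.lower (PySem.Str.join " " imports)))) then
      signals ++ ["svelte"]
    else signals
  let signals :=
    if (["express", "fastify", "koa"].any (fun fw => PySem.Str.isIn fw (PySem.Str.lower (PySem.Str.join " " imports)))) then
      signals ++ ["node_web_framework"]
    else if (["@nestjs", "nest"].any (fun fw => PySem.Str.isIn fw (PySem.Str.lower (PySem.Str.join " " imports)))) then
      signals ++ ["nestjs"]
    else if (["next", "nuxt"].any (fun fw => PySem.Str.isIn fw (PySem.Str.lower (PySem.Str.join " " imports)))) then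
      signals ++ ["fullstack_framework"]
    else signals
  let signals :=
    if (["jest", "mocha", "chai", "cypress"].any (fun fw => PySem.Str.isIn fw (PySem.Str.lower (PySem.Str.join " " imports)))) then
      signals ++ ["testing_framework"]
    else signals
  let signals :=
    if (["webpack", "vite", "rollup", "parcel"].any (fun fw => PySem.Str.isIn fw (PySem.Str.lower (PySem.Str.join " " imports)))) then
      signals ++ ["build_tool"]
    else signals
  signals

-- ===== PORT B =====
-- the FRAMEWORKS table of Source B: priority groups of (label, keywords)
def pvGroups : List (List (String × List String)) :=
  [[("react", ["react", "react-dom"]),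
    ("vue", ["vue", "@vue"]),
    ("angular", ["@angular", "angular"]),
    ("svelte", ["svelte", "sveltekit"])],
   [("node_web_framework", ["express", "fastify", "koa"]),
    ("nestjs", ["@nestjs", "nest"]),
    ("fullstack_framework", ["next", "nuxt"])],
   [("testing_framework", ["jest", "mocha", "chai", "cypress"])],
   [("build_tool", ["webpack", "vite", "rollup", "parcel"])]]

-- phase 1 of Source B: one pass over the imports collecting every label whose keywords hit
def pvHit (imports : List String) : PySem.Set String :=
  imports.foldl (fun hit imp =>
    let low := PySem.Str.lower imp
    pvGroups.foldl (fun hit group =>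
      group.foldl (fun hit lk =>
        if lk.2.any (fun k => PySem.Str.isIn k low) then PySem.Set.add hit lk.1 else hit) hit) hit)
    PySem.Set.empty

-- inner loop of phase 2: first label of the group that is in the hit set (break)
def pvFirstHit (hit : PySem.Set String) : List (String × List String) → Option String
  | [] => none
  | lk :: rest => if PySem.Set.contains hit lk.1 then some lk.1 else pvFirstHit hit rest

def detect_framework_signals_alt (content : String) (imports : List String) : List String :=
  let hit := pvHit imports
  pvGroups.foldl (fun signals group =>
    match pvFirstHit hit group with
    | some label => signals ++ [label]
    | none => signals) []

-- ===== PRECONDITION & SPEC =====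
def Spec_detect_framework_signals (content : String) (imports : List String) (out : List String) : Prop := out = detect_framework_signals_alt content imports
instance (content : String) (imports : List String) (out : List String) : Decidable (Spec_detect_framework_signals content imports out) := by unfold Spec_detect_framework_signals; infer_instance

-- ===== CLAIM (what is proved, stated in full; the proofs are below) =====
def Claim_equal_detect_framework_signals : Prop := ∀ (content : String) (imports : List String), Dom_detect_framework_signals content imports → Spec_detect_framework_signals content imports (detect_framework_signals content imports)

-- ===== LEMMAS AND PROOFS =====

-- a space-free pattern that is a prefix of `a ++ ' ' :: b` is a prefix of `a`
theorem pv_prefix_space {p a b : List Char} (hsp : ' ' ∉ p) (h : p <+: a ++ ' ' :: b) :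
    p <+: a := by
  by_cases hlen : p.length ≤ a.length
  · rw [List.prefix_iff_eq_take, List.take_append, Nat.sub_eq_zero_of_le hlen,
      List.take_zero, List.append_nil] at h
    exact h ▸ List.take_prefix _ _
  · exfalso
    obtain ⟨t, ht⟩ := h
    have hlt : a.length < p.length := Nat.lt_of_not_le hlen
    have h1 : (p ++ t)[a.length]? = some ' ' := by
      rw [ht, List.getElem?_append_right (le_refl _)]
      simp
    rw [List.getElem?_append_left hlt] at h1
    exact hsp (List.mem_of_getElem? h1)

-- a nonempty space-free pattern is an infix of `a ++ ' ' :: b` iff of `a` or of `b`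
theorem pv_infix_space {p : List Char} (hne : p ≠ []) (hsp : ' ' ∉ p) :
    ∀ (a b : List Char), p <:+: a ++ ' ' :: b ↔ p <:+: a ∨ p <:+: b := by
  intro a
  induction a with
  | nil =>
    intro b
    simp only [List.nil_append, List.infix_cons_iff]
    constructor
    · rintro (hpre | hinf)
      · exfalso
        cases p with
        | nil => exact hne rfl
        | cons c q =>
          obtain ⟨t, ht⟩ := hpre
          have hc : c = ' ' := by
            have := congrArg (fun l => l.head?) ht
            simpa using this
          exact hsp (hc ▸ List.mem_cons_self)
      · exact Or.inr hinf
    · rintro (h | h)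
      · exfalso; rw [List.infix_nil] at h; exact hne h
      · exact Or.inr h
  | cons c a ih =>
    intro b
    rw [List.cons_append, List.infix_cons_iff]
    constructor
    · rintro (hpre | hinf)
      · left
        have : p <+: (c :: a) ++ ' ' :: b := by rwa [List.cons_append]
        exact (pv_prefix_space hsp this).isInfix
      · rcases (ih b).mp hinf with h | h
        · exact Or.inl (List.infix_cons h)
        · exact Or.inr h
    · rintro (h | h)
      · rcases List.infix_cons_iff.mp h with hp | hi
        · left
          have := hp.trans (List.prefix_append (c :: a) (' ' :: b))
          rwa [List.cons_append] at this
        · exact Or.inr ((ih b).mpr (Or.inl hi))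
      · exact Or.inr ((ih b).mpr (Or.inr h))

-- lowercasing commutes with joining on a single space
theorem pv_lower_join : ∀ xss : List (List Char),
    PySem.Chars.lower (PySem.Chars.join [' '] xss)
      = PySem.Chars.join [' '] (xss.map PySem.Chars.lower)
  | [] => rfl
  | [x] => by
      simp [PySem.Chars.join_singleton]
  | x :: y :: t => by
      rw [PySem.Chars.join_cons_cons, List.map_cons, List.map_cons,
        PySem.Chars.join_cons_cons]
      have ht := pv_lower_join (y :: t)
      rw [List.map_cons] at ht
      calc PySem.Chars.lower (x ++ [' '] ++ PySem.Chars.join [' '] (y :: t))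
          = PySem.Chars.lower x ++ PySem.Chars.lower [' ']
              ++ PySem.Chars.lower (PySem.Chars.join [' '] (y :: t)) := by
            simp [PySem.Chars.lower]
        _ = PySem.Chars.lower x ++ [' ']
              ++ PySem.Chars.join [' '] (PySem.Chars.lower y :: List.map PySem.Chars.lower t) := by
            rw [show PySem.Chars.lower [' '] = [' '] from by decide, ht]

-- a nonempty space-free pattern is an infix of the space-join iff of some part
theorem pv_infix_join {p : List Char} (hne : p ≠ []) (hsp : ' ' ∉ p) :
    ∀ xss : List (List Char),
      p <:+: PySem.Chars.join [' '] xss ↔ ∃ xs ∈ xss, p <:+: xs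
  | [] => by
      simp [PySem.Chars.join, List.intercalate, List.infix_nil, hne]
  | [x] => by
      simp [PySem.Chars.join_singleton]
  | x :: y :: t => by
      rw [PySem.Chars.join_cons_cons]
      have hrw : x ++ [' '] ++ PySem.Chars.join [' '] (y :: t)
          = x ++ ' ' :: PySem.Chars.join [' '] (y :: t) := by
        simp [List.append_assoc]
      rw [hrw, pv_infix_space hne hsp, pv_infix_join hne hsp (y :: t)]
      constructor
      · rintro (h | ⟨xs, hm, h⟩)
        · exact ⟨x, List.mem_cons_self, h⟩
        · exact ⟨xs, List.mem_cons_of_mem _ hm, h⟩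
      · rintro ⟨xs, hm, h⟩
        rcases List.mem_cons.mp hm with rfl | hm
        · exact Or.inl h
        · exact Or.inr ⟨xs, hm, h⟩

-- a nonempty space-free keyword occurs in ' '.join(imports).lower() iff in some import
theorem pv_isIn_join (k : String) (hne : k.toList ≠ []) (hsp : ' ' ∉ k.toList)
    (imports : List String) :
    PySem.Str.isIn k (PySem.Str.lower (PySem.Str.join " " imports)) = true
      ↔ ∃ imp ∈ imports, PySem.Str.isIn k (PySem.Str.lower imp) = true := by
  rw [PySem.Str.isIn_iff_infix, PySem.Str.toList_lower, PySem.Str.toList_join]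
  have hsep : (" " : String).toList = [' '] := rfl
  rw [hsep, pv_lower_join, pv_infix_join hne hsp]
  constructor
  · rintro ⟨xs, hxs, h⟩
    rw [List.mem_map] at hxs
    obtain ⟨l, hl, rfl⟩ := hxs
    rw [List.mem_map] at hl
    obtain ⟨imp, him, rfl⟩ := hl
    refine ⟨imp, him, ?_⟩
    rw [PySem.Str.isIn_iff_infix, PySem.Str.toList_lower]
    exact h
  · rintro ⟨imp, him, h⟩
    rw [PySem.Str.isIn_iff_infix, PySem.Str.toList_lower] at h
    exact ⟨PySem.Chars.lower imp.toList,
      List.mem_map_of_mem (List.mem_map_of_mem him), h⟩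

-- membership after the inner (per-group) conditional-add loop of phase 1
theorem pv_mem_foldl_add1 (imp : String) (g : List (String × List String)) :
    ∀ (s : PySem.Set String) (y : String),
      y ∈ g.foldl (fun hit lk =>
          if lk.2.any (fun k => PySem.Str.isIn k (PySem.Str.lower imp)) then PySem.Set.add hit lk.1 else hit) s
        ↔ y ∈ s ∨ ∃ lk ∈ g, (lk.2.any fun k => PySem.Str.isIn k (PySem.Str.lower imp)) = true ∧ y = lk.1 := by
  induction g with
  | nil => intro s y; simp
  | cons lk rest ih =>
    intro s y
    rw [List.foldl_cons, ih]
    by_cases hq : (lk.2.any fun k => PySem.Str.isIn k (PySem.Str.lower imp)) = true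
    · simp only [hq, if_pos, PySem.Set.mem_add, List.mem_cons]
      constructor
      · rintro (⟨h | h⟩ | ⟨x, hx, hqq, rfl⟩)
        · exact Or.inl h
        · exact Or.inr ⟨lk, Or.inl rfl, hq, h⟩
        · exact Or.inr ⟨x, Or.inr hx, hqq, rfl⟩
      · rintro (h | ⟨x, (rfl | hx), hqq, rfl⟩)
        · exact Or.inl (Or.inl h)
        · exact Or.inl (Or.inr rfl)
        · exact Or.inr ⟨x, hx, hqq, rfl⟩
    · simp only [hq, List.mem_cons]
      constructor
      · rintro (h | ⟨x, hx, hqq, rfl⟩)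
        · exact Or.inl h
        · exact Or.inr ⟨x, Or.inr hx, hqq, rfl⟩
      · rintro (h | ⟨x, (rfl | hx), hqq, rfl⟩)
        · exact Or.inl h
        · exact absurd hqq hq
        · exact Or.inr ⟨x, hx, hqq, rfl⟩

-- membership after the middle (over-the-table) loop of phase 1
theorem pv_mem_foldl_add2 (imp : String) (ls : List (List (String × List String))) :
    ∀ (s : PySem.Set String) (y : String),
      y ∈ ls.foldl (fun hit group =>
          group.foldl (fun hit lk =>
            if lk.2.any (fun k => PySem.Str.isIn k (PySem.Str.lower imp)) then PySem.Set.add hit lk.1 else hit) hit) s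
        ↔ y ∈ s ∨ ∃ g ∈ ls, ∃ lk ∈ g, (lk.2.any fun k => PySem.Str.isIn k (PySem.Str.lower imp)) = true ∧ y = lk.1 := by
  induction ls with
  | nil => intro s y; simp
  | cons g gs ih =>
    intro s y
    rw [List.foldl_cons, ih, pv_mem_foldl_add1]
    simp only [List.mem_cons]
    constructor
    · rintro (⟨h | ⟨lk, hlk, hq, rfl⟩⟩ | ⟨g', hg', hrest⟩)
      · exact Or.inl h
      · exact Or.inr ⟨g, Or.inl rfl, lk, hlk, hq, rfl⟩
      · exact Or.inr ⟨g', Or.inr hg', hrest⟩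
    · rintro (h | ⟨g', (rfl | hg'), hrest⟩)
      · exact Or.inl (Or.inl h)
      · exact Or.inl (Or.inr hrest)
      · exact Or.inr ⟨g', hg', hrest⟩

-- characterisation of the hit set built by phase 1
theorem pv_mem_pvHit (imports : List String) (y : String) :
    y ∈ pvHit imports
      ↔ ∃ imp ∈ imports, ∃ g ∈ pvGroups, ∃ lk ∈ g,
          (lk.2.any fun k => PySem.Str.isIn k (PySem.Str.lower imp)) = true ∧ y = lk.1 := by
  have hform : pvHit imports
      = imports.foldl (fun hit imp =>
          pvGroups.foldl (fun hit group =>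
            group.foldl (fun hit lk =>
              if lk.2.any (fun k => PySem.Str.isIn k (PySem.Str.lower imp)) then PySem.Set.add hit lk.1 else hit) hit) hit)
        PySem.Set.empty := rfl
  rw [hform]
  have main : ∀ (l : List String) (s : PySem.Set String),
      y ∈ l.foldl (fun hit imp =>
          pvGroups.foldl (fun hit group =>
            group.foldl (fun hit lk =>
              if lk.2.any (fun k => PySem.Str.isIn k (PySem.Str.lower imp)) then PySem.Set.add hit lk.1 else hit) hit) hit) s
        ↔ y ∈ s ∨ ∃ imp ∈ l, ∃ g ∈ pvGroups, ∃ lk ∈ g,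
            (lk.2.any fun k => PySem.Str.isIn k (PySem.Str.lower imp)) = true ∧ y = lk.1 := by
    intro l
    induction l with
    | nil => intro s; simp
    | cons imp rest ih =>
      intro s
      rw [List.foldl_cons, ih, pv_mem_foldl_add2]
      simp only [List.mem_cons]
      constructor
      · rintro (⟨h | hhere⟩ | ⟨imp', him', hrest⟩)
        · exact Or.inl h
        · exact Or.inr ⟨imp, Or.inl rfl, hhere⟩
        · exact Or.inr ⟨imp', Or.inr him', hrest⟩
      · rintro (h | ⟨imp', (rfl | him'), hrest⟩)
        · exact Or.inl (Or.inl h)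
        · exact Or.inl (Or.inr hrest)
        · exact Or.inr ⟨imp', him', hrest⟩
  rw [main]
  simp only [PySem.Set.empty, List.mem_nil_iff, false_or]

-- A's per-group keyword test equals B's hit-set lookup
set_option maxHeartbeats 1000000 in
theorem pv_cond_eq (imports : List String) (L : String) (kws : List String)
    (hin : ∃ g ∈ pvGroups, (L, kws) ∈ g)
    (huniq : ∀ g ∈ pvGroups, ∀ lk ∈ g, lk.1 = L → lk.2 = kws)
    (hk : ∀ k ∈ kws, k.toList ≠ [] ∧ ' ' ∉ k.toList) :
    (kws.any fun fw => PySem.Str.isIn fw (PySem.Str.lower (PySem.Str.join " " imports)))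
      = PySem.Set.contains (pvHit imports) L := by
  rw [Bool.eq_iff_iff, PySem.Set.contains_iff, pv_mem_pvHit]
  simp only [List.any_eq_true]
  constructor
  · rintro ⟨k, hkmem, hIn⟩
    obtain ⟨imp, him, h⟩ := (pv_isIn_join k (hk k hkmem).1 (hk k hkmem).2 imports).mp hIn
    obtain ⟨g, hg, hlk⟩ := hin
    exact ⟨imp, him, g, hg, (L, kws), hlk, ⟨k, hkmem, h⟩, rfl⟩
  · rintro ⟨imp, him, g, hg, lk, hlk, hany, rfl⟩
    have hk2 := huniq g hg lk hlk rfl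
    obtain ⟨k, hkm, hk'⟩ := hany
    rw [hk2] at hkm
    exact ⟨k, hkm, (pv_isIn_join k (hk k hkm).1 (hk k hkm).2 imports).mpr ⟨imp, him, hk'⟩⟩

-- ===== VERDICT (by name: the statement is the Claim_ definition above) =====
set_option maxHeartbeats 4000000 in
theorem detect_framework_signals_spec : Claim_equal_detect_framework_signals := by
  intro content imports _
  unfold Spec_detect_framework_signals detect_framework_signals detect_framework_signals_alt
  rw [pv_cond_eq imports "react" ["react", "react-dom"] (by decide) (by decide) (by decide),
    pv_cond_eq imports "vue" ["vue", "@vue"] (by decide) (by decide) (by decide),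
    pv_cond_eq imports "angular" ["@angular", "angular"] (by decide) (by decide) (by decide),
    pv_cond_eq imports "svelte" ["svelte", "sveltekit"] (by decide) (by decide) (by decide),
    pv_cond_eq imports "node_web_framework" ["express", "fastify", "koa"] (by decide) (by decide) (by decide),
    pv_cond_eq imports "nestjs" ["@nestjs", "nest"] (by decide) (by decide) (by decide),
    pv_cond_eq imports "fullstack_framework" ["next", "nuxt"] (by decide) (by decide) (by decide),
    pv_cond_eq imports "testing_framework" ["jest", "mocha", "chai", "cypress"] (by decide) (by decide) (by decide),
    pv_cond_eq imports "build_tool" ["webpack", "vite", "rollup", "parcel"] (by decide) (by decide) (by decide)]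
  simp only [pvGroups, List.foldl_cons, List.foldl_nil, pvFirstHit]
  generalize PySem.Set.contains (pvHit imports) "react" = c1
  generalize PySem.Set.contains (pvHit imports) "vue" = c2
  generalize PySem.Set.contains (pvHit imports) "angular" = c3
  generalize PySem.Set.contains (pvHit imports) "svelte" = c4
  generalize PySem.Set.contains (pvHit imports) "node_web_framework" = c5
  generalize PySem.Set.contains (pvHit imports) "nestjs" = c6
  generalize PySem.Set.contains (pvHit imports) "fullstack_framework" = c7
  generalize PySem.Set.contains (pvHit imports) "testing_framework" = c8
  generalize PySem.Set.contains (pvHit imports) "build_tool" = c9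
  revert c1 c2 c3 c4 c5 c6 c7 c8 c9
  decide
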